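-- pv_equiv track=rewrite | github.com/wiserlake0996/text-extract-py | py.py | extractGS4
-- ===== SOURCE A (Python) =====
-- def extractGS4(gs4_extract):
--     gs4_split_by_error = []
--     gs4_string = ""
--
--     #check if 'PROBLEM:' exists in line to identify start of an error set"""
--     for g in range(len(gs4_extract)):
--         if("PROBLEM:" in gs4_extract[g].upper()):
--
--             #add the header / error name to string
--             gs4_string +=gs4_extract[g]+"\n"
--
--             #Loop and add every other line to string till another error set is found"""
--             for g2 in range(g+1, len(gs4_extract)):
--                 #if at the end, add the last item and exit
--                 if g2 == len(gs4_extract):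
--                     gs4_split_by_error.append(gs4_string)
--                     break
--
--                 if ("PROBLEM:" in gs4_extract[g2].upper()):
--                     gs4_split_by_error.append(gs4_string)
--                     #re-focus pointer of outer loop to inner (loop -1) landing just before the next error set header
--                     g= g2 - 1
--                     gs4_string = ""
--                     break
--
--                 gs4_string += gs4_extract[g2] + "\n"
--
--     return gs4_split_by_error
-- ===== SOURCE B (Python) =====
-- def extractGS4(gs4_extract):
--     # One pass to find the PROBLEM: header indices, then one block per consecutive pair.
--     # (Like the original, the block started by the last header is never emitted.)
--     headers = [i for i, line in enumerate(gs4_extract) if "PROBLEM:" in line.upper()]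
--     return ["".join(line + "\n" for line in gs4_extract[start:stop])
--             for start, stop in zip(headers, headers[1:])]
-- ===== Notes on version B (the rewrite author's own statement) =====
-- stated objective: simpler
-- what changed: A's nested loops (an inner rescan from each header that re-accumulates a growing string and implicitly drops the last block) are replaced by one pass collecting the PROBLEM: header indices and a join over the lines between each consecutive pair of headers.
import Mathlib
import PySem

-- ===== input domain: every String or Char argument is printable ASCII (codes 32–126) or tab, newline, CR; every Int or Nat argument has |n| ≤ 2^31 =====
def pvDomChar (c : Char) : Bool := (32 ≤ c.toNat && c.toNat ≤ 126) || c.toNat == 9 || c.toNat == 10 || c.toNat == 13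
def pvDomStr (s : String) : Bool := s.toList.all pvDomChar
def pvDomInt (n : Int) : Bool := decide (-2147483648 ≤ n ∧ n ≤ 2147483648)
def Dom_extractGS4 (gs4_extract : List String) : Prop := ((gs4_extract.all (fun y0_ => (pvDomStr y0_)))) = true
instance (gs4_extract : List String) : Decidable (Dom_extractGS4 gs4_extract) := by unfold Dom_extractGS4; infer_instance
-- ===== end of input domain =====

-- B replaces A's nested rescanning loops by one header-index scan plus one block per
-- consecutive header pair (objective: simpler; same asymptotic cost).

-- '"PROBLEM:" in line.upper()' (used verbatim by both Python versions)
def hasProblemLine (s : String) : Bool := PySem.Str.isIn "PROBLEM:" (PySem.Str.upper s)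

-- ===== PORT A =====
-- inner 'for g2 in range(g+1, len(gs4_extract))' loop; state = (gs4_split_by_error, gs4_string).
-- The 'if g2 == len(gs4_extract)' branch is kept literally (it is dead: range excludes len).
def extractGS4Inner (xs : List String) (g2 : Nat) (res : List String) (s : String) :
    List String × String :=
  if _h : g2 < xs.length then
    if g2 = xs.length then (res ++ [s], s)
    else if hasProblemLine (xs.getD g2 "") then (res ++ [s], "")
    else extractGS4Inner xs (g2 + 1) res (s ++ xs.getD g2 "" ++ "\n")
  else (res, s)
termination_by xs.length - g2

-- outer 'for g in range(len(gs4_extract))' loop (the 'g = g2 - 1' assignment in the Python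
-- has no effect on a range loop and is therefore not represented).
def extractGS4Outer (xs : List String) (g : Nat) (res : List String) (s : String) :
    List String × String :=
  if h : g < xs.length then
    if hasProblemLine (xs.getD g "") then
      let p := extractGS4Inner xs (g + 1) res (s ++ xs.getD g "" ++ "\n")
      extractGS4Outer xs (g + 1) p.1 p.2
    else extractGS4Outer xs (g + 1) res s
  else (res, s)
termination_by xs.length - g

def extractGS4 (gs4_extract : List String) : List String :=
  (extractGS4Outer gs4_extract 0 [] "").1

-- ===== PORT B =====
def extractGS4_alt (gs4_extract : List String) : List String :=
  let headers := ((PySem.List.enumerate gs4_extract).filter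
      (fun p => hasProblemLine p.2)).map (fun p => p.1)
  (headers.zip (PySem.List.slice headers (some 1) none)).map (fun p =>
    String.join ((PySem.List.slice gs4_extract (some p.1) (some p.2)).map
      (fun line => line ++ "\n")))

-- ===== PRECONDITION & SPEC =====
def Spec_extractGS4 (gs4_extract : List String) (out : List String) : Prop := out = extractGS4_alt gs4_extract
instance (gs4_extract : List String) (out : List String) : Decidable (Spec_extractGS4 gs4_extract out) := by unfold Spec_extractGS4; infer_instance

-- ===== CLAIM (what is proved, stated in full; the proofs are below) =====
def Claim_equal_extractGS4 : Prop := ∀ (gs4_extract : List String), Dom_extractGS4 gs4_extract → Spec_extractGS4 gs4_extract (extractGS4 gs4_extract)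

-- ===== LEMMAS AND PROOFS =====

-- header indices in [g, xs.length)
def hdrsFrom (xs : List String) (g : Nat) : List Nat :=
  (List.range' g (xs.length - g)).filter (fun i => hasProblemLine (xs.getD i ""))

-- the string a block built from lines [a, b) becomes
def blockStr (xs : List String) (a b : Nat) : String :=
  String.join (((xs.drop a).take (b - a)).map (fun line => line ++ "\n"))

def blocks (xs : List String) (L : List Nat) : List String :=
  (L.zip L.tail).map (fun p => blockStr xs p.1 p.2)

lemma join_cons (a : String) (l : List String) :
    String.join (a :: l) = a ++ String.join l := by
  simp [String.join_eq]

lemma hdrsFrom_stop {xs : List String} {g : Nat} (h : xs.length ≤ g) :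
    hdrsFrom xs g = [] := by
  unfold hdrsFrom
  have : xs.length - g = 0 := by omega
  simp [this]

lemma hdrsFrom_cons {xs : List String} {g : Nat} (h : g < xs.length) :
    hdrsFrom xs g =
      if hasProblemLine (xs.getD g "") then g :: hdrsFrom xs (g + 1)
      else hdrsFrom xs (g + 1) := by
  unfold hdrsFrom
  have h1 : xs.length - g = (xs.length - (g + 1)) + 1 := by omega
  rw [h1, List.range'_succ, List.filter_cons]

lemma mem_hdrsFrom_lb {xs : List String} {g h : Nat} (hm : h ∈ hdrsFrom xs g) :
    g ≤ h := by
  unfold hdrsFrom at hm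
  have := (List.mem_filter.mp hm).1
  have := List.mem_range'.mp this
  omega

lemma blockStr_empty {xs : List String} {a b : Nat} (h : b ≤ a) :
    blockStr xs a b = "" := by
  unfold blockStr
  have : b - a = 0 := by omega
  simp [this, String.join_eq]

lemma blockStr_cons {xs : List String} {a b : Nat} (hab : a < b) (han : a < xs.length) :
    blockStr xs a b = xs.getD a "" ++ "\n" ++ blockStr xs (a + 1) b := by
  unfold blockStr
  have hd : xs.drop a = xs[a] :: xs.drop (a + 1) := List.drop_eq_getElem_cons han
  have hb : b - a = (b - (a + 1)) + 1 := by omega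
  rw [hd, hb, List.take_succ_cons, List.map_cons, join_cons,
    List.getD_eq_getElem xs "" han, String.append_assoc]

lemma inner_none {xs : List String} : ∀ k g2, xs.length - g2 ≤ k →
    hdrsFrom xs g2 = [] → ∀ res s,
    extractGS4Inner xs g2 res s = (res, s ++ blockStr xs g2 xs.length) := by
  intro k
  induction k with
  | zero =>
    intro g2 hk _ res s
    have hge : xs.length ≤ g2 := by omega
    rw [extractGS4Inner, blockStr_empty hge]
    simp [Nat.not_lt.mpr hge]
  | succ k ih =>
    intro g2 hk hh res s
    by_cases hlt : g2 < xs.length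
    · rw [hdrsFrom_cons hlt] at hh
      by_cases hp : hasProblemLine (xs.getD g2 "")
      · rw [if_pos hp] at hh
        exact absurd hh (by simp)
      · rw [if_neg hp] at hh
        rw [extractGS4Inner, dif_pos hlt, if_neg (Nat.ne_of_lt hlt), if_neg hp]
        rw [ih (g2 + 1) (by omega) hh, blockStr_cons hlt hlt]
        simp [String.append_assoc]
    · have hge : xs.length ≤ g2 := by omega
      rw [extractGS4Inner, blockStr_empty hge]
      simp [Nat.not_lt.mpr hge]

lemma inner_found {xs : List String} : ∀ k g2 h t, xs.length - g2 ≤ k →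
    hdrsFrom xs g2 = h :: t → ∀ res s,
    extractGS4Inner xs g2 res s = (res ++ [s ++ blockStr xs g2 h], "") := by
  intro k
  induction k with
  | zero =>
    intro g2 h t hk hh res s
    rw [hdrsFrom_stop (by omega)] at hh
    exact absurd hh (by simp)
  | succ k ih =>
    intro g2 h t hk hh res s
    by_cases hlt : g2 < xs.length
    · rw [hdrsFrom_cons hlt] at hh
      by_cases hp : hasProblemLine (xs.getD g2 "")
      · rw [if_pos hp] at hh
        injection hh with h1 h2
        rw [extractGS4Inner, dif_pos hlt, if_neg (Nat.ne_of_lt hlt), if_pos hp]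
        rw [blockStr_empty (by omega : h ≤ g2)]
        simp
      · rw [if_neg hp] at hh
        have hgh : g2 < h := by
          have hm : h ∈ hdrsFrom xs (g2 + 1) := by rw [hh]; exact List.mem_cons_self
          have := mem_hdrsFrom_lb hm
          omega
        rw [extractGS4Inner, dif_pos hlt, if_neg (Nat.ne_of_lt hlt), if_neg hp]
        rw [ih (g2 + 1) h t (by omega) hh, blockStr_cons hgh hlt]
        simp [String.append_assoc]
    · rw [hdrsFrom_stop (by omega)] at hh
      exact absurd hh (by simp)

lemma outer_none {xs : List String} : ∀ k g, xs.length - g ≤ k →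
    hdrsFrom xs g = [] → ∀ res s,
    extractGS4Outer xs g res s = (res, s) := by
  intro k
  induction k with
  | zero =>
    intro g hk _ res s
    rw [extractGS4Outer]
    simp [Nat.not_lt.mpr (by omega : xs.length ≤ g)]
  | succ k ih =>
    intro g hk hh res s
    by_cases hlt : g < xs.length
    · rw [hdrsFrom_cons hlt] at hh
      by_cases hp : hasProblemLine (xs.getD g "")
      · rw [if_pos hp] at hh
        exact absurd hh (by simp)
      · rw [if_neg hp] at hh
        rw [extractGS4Outer, dif_pos hlt, if_neg hp]
        exact ih (g + 1) (by omega) hh res s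
    · rw [extractGS4Outer]
      simp [Nat.not_lt.mpr (by omega : xs.length ≤ g)]

lemma outer_spec {xs : List String} : ∀ k g, xs.length - g ≤ k → ∀ res,
    (extractGS4Outer xs g res "").1 = res ++ blocks xs (hdrsFrom xs g) := by
  intro k
  induction k with
  | zero =>
    intro g hk res
    rw [extractGS4Outer, hdrsFrom_stop (by omega)]
    simp [blocks, Nat.not_lt.mpr (by omega : xs.length ≤ g)]
  | succ k ih =>
    intro g hk res
    by_cases hlt : g < xs.length
    · by_cases hp : hasProblemLine (xs.getD g "")
      · rw [extractGS4Outer, dif_pos hlt, if_pos hp]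
        rcases hrec : hdrsFrom xs (g + 1) with _ | ⟨h, t⟩
        · rw [inner_none (xs.length - (g + 1)) (g + 1) le_rfl hrec res _]
          rw [outer_none (xs.length - (g + 1)) (g + 1) le_rfl hrec]
          rw [hdrsFrom_cons hlt, if_pos hp, hrec]
          simp [blocks]
        · rw [inner_found (xs.length - (g + 1)) (g + 1) h t le_rfl hrec res _]
          rw [ih (g + 1) (by omega)]
          rw [hdrsFrom_cons hlt, if_pos hp, hrec]
          have hgh : g < h := by
            have hm : h ∈ hdrsFrom xs (g + 1) := by rw [hrec]; exact List.mem_cons_self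
            have := mem_hdrsFrom_lb hm
            omega
          have hblk : "" ++ xs.getD g "" ++ "\n" ++ blockStr xs (g + 1) h = blockStr xs g h := by
            rw [blockStr_cons hgh hlt]
            simp [String.append_assoc]
          simp only [blocks, List.tail_cons, List.zip_cons_cons, List.map_cons, hblk]
          simp
      · rw [extractGS4Outer, dif_pos hlt, if_neg hp]
        rw [ih (g + 1) (by omega), hdrsFrom_cons hlt, if_neg hp]
    · rw [extractGS4Outer, hdrsFrom_stop (by omega)]
      simp [blocks, Nat.not_lt.mpr (by omega : xs.length ≤ g)]

lemma alt_eq (xs : List String) :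
    extractGS4_alt xs = blocks xs (hdrsFrom xs 0) := by
  have hhdr : ((PySem.List.enumerate xs).filter (fun p => hasProblemLine p.2)).map
      (fun p => p.1) = (hdrsFrom xs 0).map (fun (i : Nat) => (i : Int)) := by
    rw [PySem.List.enumerate_eq_map_pyRange xs ""]
    rw [show PySem.List.len xs = ((xs.length : Int)) from rfl,
      PySem.List.pyRange_zero_natCast, List.map_map, List.filter_map, List.map_map]
    unfold hdrsFrom
    rw [List.range_eq_range', Nat.sub_zero]
    refine congrArg _ (List.filter_congr ?_)
    intro i _
    simp [Function.comp, PySem.List.pyGetD_natCast]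
  simp only [extractGS4_alt, hhdr, PySem.List.slice_from_one, ← List.map_tail,
    List.zip_map, List.map_map]
  unfold blocks
  refine List.map_congr_left ?_
  intro p _
  simp only [Function.comp, Prod.map]
  rw [PySem.List.slice_natCast]
  rfl

-- ===== VERDICT (by name: the statement is the Claim_ definition above) =====
theorem extractGS4_spec : Claim_equal_extractGS4 := by
  intro xs _
  unfold Spec_extractGS4 extractGS4
  rw [outer_spec (xs.length - 0) 0 le_rfl [], alt_eq]
  simp
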